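-- pv_equiv track=rewrite | github.com/kaipoiM/HVERI-AlohaAI-Watchtower | Watchtower/backend/watchtower.py | format_submissions
-- ===== SOURCE A (Python) =====
-- from typing import Optional, List, Dict, Callable
--
-- def format_submissions(submissions: List[Dict]) -> str:
--     """
--     Convert a list of submission dicts into a structured text block
--     for the Claude prompt. Groups by district for readability.
--     """
--     # Group by district
--     by_district: Dict[str, List[Dict]] = {}
--     for sub in submissions:
--         d = sub.get("district", "Unknown")
--         by_district.setdefault(d, []).append(sub)
--
--     lines = []
--     for district, subs in sorted(by_district.items()):
--         lines.append(f"\n=== {district} ===")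
--         for sub in subs:
--             lines.append(f"  REF: {sub.get('ref_code', '—')}")
--             lines.append(f"  Type: {sub.get('incident_type', '—')}")
--             lines.append(f"  Severity: {sub.get('severity', '—')}")
--             lines.append(f"  Location: {sub.get('location') or 'Not specified'}")
--             lines.append(f"  Description: {sub.get('description', '—')}")
--             evac = sub.get("evacuation")
--             if evac:
--                 lines.append(f"  Evacuation: {evac}")
--             lines.append(f"  Submitted: {sub.get('timestamp', '—')}")
--             lines.append("")
--
--     return "\n".join(lines)
-- ===== SOURCE B (Python) =====
-- def format_submissions(submissions):
--     """Same text block as A, built without a grouping dict: sort the distinct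
--     district names once, then scan the submission list per district."""
--
--     def _key(sub):
--         return sub.get("district", "Unknown")
--
--     def _sub_lines(sub):
--         out = [
--             f"  REF: {sub.get('ref_code', '—')}",
--             f"  Type: {sub.get('incident_type', '—')}",
--             f"  Severity: {sub.get('severity', '—')}",
--             f"  Location: {sub.get('location') or 'Not specified'}",
--             f"  Description: {sub.get('description', '—')}",
--         ]
--         evac = sub.get("evacuation")
--         if evac:
--             out.append(f"  Evacuation: {evac}")
--         out.append(f"  Submitted: {sub.get('timestamp', '—')}")
--         out.append("")
--         return out
--
--     lines = []
--     for district in sorted({_key(s) for s in submissions}):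
--         lines.append(f"\n=== {district} ===")
--         for sub in submissions:
--             if _key(sub) == district:
--                 lines.extend(_sub_lines(sub))
--     return "\n".join(lines)
-- ===== Notes on version B (the rewrite author's own statement) =====
-- stated objective: simpler
-- what changed: B drops the by_district dict entirely: it sorts the distinct district names once and, for each district in order, scans the submission list for its entries, instead of maintaining a dict of per-district lists and sorting its items.
import Mathlib
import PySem

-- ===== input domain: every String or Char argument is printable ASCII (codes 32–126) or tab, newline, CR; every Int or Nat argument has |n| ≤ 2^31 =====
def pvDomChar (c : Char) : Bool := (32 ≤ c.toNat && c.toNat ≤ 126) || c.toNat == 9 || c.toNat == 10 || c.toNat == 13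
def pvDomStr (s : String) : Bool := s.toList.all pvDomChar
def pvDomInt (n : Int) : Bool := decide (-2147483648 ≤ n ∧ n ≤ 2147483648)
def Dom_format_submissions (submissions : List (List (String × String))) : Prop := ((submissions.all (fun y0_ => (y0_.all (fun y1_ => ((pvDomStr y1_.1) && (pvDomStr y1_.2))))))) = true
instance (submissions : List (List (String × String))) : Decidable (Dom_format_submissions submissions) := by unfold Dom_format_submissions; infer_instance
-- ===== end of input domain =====

-- B groups without a dict: sort the distinct district names, then scan the list per district
-- (objective: simpler; same return value, not claimed faster).

-- ===== PORT A =====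
-- the submission "dict" sub.get(k, dflt) / sub.get(k)
def pvGetDA (sub : List (String × String)) (k dflt : String) : String :=
  (PySem.Dict.ofList sub).getD k dflt
def pvGet?A (sub : List (String × String)) (k : String) : Option String :=
  (PySem.Dict.ofList sub).get? k

def format_submissions (submissions : List (List (String × String))) : String :=
  -- by_district built by setdefault(d, []).append(sub) = Dict.modify d [] (· ++ [sub])
  let by_district : PySem.Dict String (List (List (String × String))) :=
    submissions.foldl (fun d sub => d.modify (pvGetDA sub "district" "Unknown") [] (· ++ [sub]))
      PySem.Dict.empty
  -- sorted(by_district.items()): dict keys are distinct, so Python's tuple comparison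
  -- only ever compares the string keys — key = fst is exact here
  let lines : List String :=
    (PySem.List.sorted by_district.items (fun p => p.1)).foldl
      (fun lines dsubs =>
        dsubs.2.foldl
          (fun lines sub =>
            let lines := lines ++ ["  REF: " ++ pvGetDA sub "ref_code" "—"]
            let lines := lines ++ ["  Type: " ++ pvGetDA sub "incident_type" "—"]
            let lines := lines ++ ["  Severity: " ++ pvGetDA sub "severity" "—"]
            -- sub.get('location') or 'Not specified': None and "" are both falsy
            let loc := match pvGet?A sub "location" with
              | some l => if l = "" then "Not specified" else l
              | none   => "Not specified"
            let lines := lines ++ ["  Location: " ++ loc]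
            let lines := lines ++ ["  Description: " ++ pvGetDA sub "description" "—"]
            -- if evac: (None and "" falsy)
            let lines := match pvGet?A sub "evacuation" with
              | some e => if e = "" then lines else lines ++ ["  Evacuation: " ++ e]
              | none   => lines
            let lines := lines ++ ["  Submitted: " ++ pvGetDA sub "timestamp" "—"]
            lines ++ [""])
          (lines ++ ["\n=== " ++ dsubs.1 ++ " ==="]))
      []
  PySem.Str.join "\n" lines

-- ===== PORT B =====
def pvKeyB (sub : List (String × String)) : String :=
  (PySem.Dict.ofList sub).getD "district" "Unknown"

def pvSubLinesB (sub : List (String × String)) : List String :=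
  let m := PySem.Dict.ofList sub
  let out : List String :=
    [ "  REF: " ++ m.getD "ref_code" "—",
      "  Type: " ++ m.getD "incident_type" "—",
      "  Severity: " ++ m.getD "severity" "—",
      "  Location: " ++ (match m.get? "location" with
                          | some l => if l = "" then "Not specified" else l
                          | none   => "Not specified"),
      "  Description: " ++ m.getD "description" "—" ]
  let out := match m.get? "evacuation" with
    | some e => if e = "" then out else out ++ ["  Evacuation: " ++ e]
    | none   => out
  let out := out ++ ["  Submitted: " ++ m.getD "timestamp" "—"]
  out ++ [""]

def format_submissions_alt (submissions : List (List (String × String))) : String :=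
  let districts := PySem.List.sorted (PySem.Set.ofList (submissions.map pvKeyB)) (fun x => x)
  let lines : List String :=
    districts.foldl
      (fun lines district =>
        submissions.foldl
          (fun lines sub =>
            if pvKeyB sub == district then lines ++ pvSubLinesB sub else lines)
          (lines ++ ["\n=== " ++ district ++ " ==="]))
      []
  PySem.Str.join "\n" lines

-- ===== PRECONDITION & SPEC =====
def Spec_format_submissions (submissions : List (List (String × String))) (out : String) : Prop := out = format_submissions_alt submissions
instance (submissions : List (List (String × String))) (out : String) : Decidable (Spec_format_submissions submissions out) := by unfold Spec_format_submissions; infer_instance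

-- ===== CLAIM (what is proved, stated in full; the proofs are below) =====
def Claim_equal_format_submissions : Prop := ∀ (submissions : List (List (String × String))), Dom_format_submissions submissions → Spec_format_submissions submissions (format_submissions submissions)

-- ===== LEMMAS AND PROOFS =====

-- the grouped items A's dict holds: distinct districts in first-appearance order, each with its filter
def pvGroupItems (xs : List (List (String × String))) : List (String × List (List (String × String))) :=
  (PySem.Set.ofList (xs.map pvKeyB)).map (fun d => (d, xs.filter (fun s => pvKeyB s == d)))

lemma pvFind?_map_pair {ν : Type} (ds : List String) (g : String → ν) (k : String) (h : k ∈ ds) :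
    List.find? (fun p => p.1 == k) (ds.map (fun d => (d, g d))) = some (k, g k) := by
  induction ds with
  | nil => cases h
  | cons d ds ih =>
    by_cases hd : d = k
    · subst hd; simp
    · have : k ∈ ds := (List.mem_cons.mp h).resolve_left (fun e => hd e.symm)
      simp [hd, ih this]

lemma pvGroup_eq (xs : List (List (String × String))) :
    (xs.foldl (fun d sub => d.modify (pvGetDA sub "district" "Unknown") [] (· ++ [sub]))
        PySem.Dict.empty).items
      = pvGroupItems xs := by
  show (xs.foldl (fun d sub => d.modify (pvKeyB sub) [] (· ++ [sub]))
          PySem.Dict.empty).items = pvGroupItems xs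
  induction xs using List.reverseRecOn with
  | nil => rfl
  | append_singleton xs x ih =>
    rw [List.foldl_append, List.foldl_cons, List.foldl_nil]
    rw [PySem.Dict.ext (x := List.foldl _ PySem.Dict.empty xs)
          (y := PySem.Dict.mk (pvGroupItems xs)) ih]
    have hR : pvGroupItems (xs ++ [x])
        = (PySem.Set.add (PySem.Set.ofList (xs.map pvKeyB)) (pvKeyB x)).map
            (fun d => (d, (xs ++ [x]).filter (fun s => pvKeyB s == d))) := by
      simp [pvGroupItems, PySem.Set.ofList, List.foldl_append]
    rw [hR]
    by_cases hmem : pvKeyB x ∈ PySem.Set.ofList (xs.map pvKeyB)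
    · -- district already present: its entry gains x, the rest are unchanged
      have hcon : (PySem.Dict.mk (pvGroupItems xs)).contains (pvKeyB x) = true := by
        simp only [PySem.Dict.contains, pvGroupItems, List.any_map,
          Function.comp_def, List.any_eq_true]
        exact ⟨pvKeyB x, hmem, by simp⟩
      have hget : (PySem.Dict.mk (pvGroupItems xs)).getD (pvKeyB x) []
          = xs.filter (fun s => pvKeyB s == pvKeyB x) := by
        simp [PySem.Dict.getD, PySem.Dict.get?, pvGroupItems,
          pvFind?_map_pair _ _ _ hmem]
      have hadd : (PySem.Set.ofList (xs.map pvKeyB)).add (pvKeyB x)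
          = PySem.Set.ofList (xs.map pvKeyB) := by
        unfold PySem.Set.add
        rw [if_pos ((PySem.Set.contains_iff _ _).mpr hmem)]
      rw [hadd]
      simp only [PySem.Dict.modify, PySem.Dict.insert, hcon, if_pos, hget]
      simp only [pvGroupItems, List.map_map]
      apply List.map_congr_left
      intro d _
      by_cases hdk : d = pvKeyB x
      · subst hdk
        simp [List.filter_append]
      · have hxd : (pvKeyB x == d) = false := by
          simp; exact fun h => hdk h.symm
        simp [List.filter_append, hxd]
        exact fun h => absurd h hdk
    · -- new district: appended at the end, old filters unchanged
      have hcon : (PySem.Dict.mk (pvGroupItems xs)).contains (pvKeyB x) = false := by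
        simp only [PySem.Dict.contains, pvGroupItems, List.any_map,
          Function.comp_def, List.any_eq_false]
        intro d hd h
        exact hmem ((by simpa using h : d = pvKeyB x) ▸ hd)
      have hknotin : pvKeyB x ∉ xs.map pvKeyB :=
        fun h => hmem ((PySem.Set.mem_ofList _ _).mpr h)
      have hget : (PySem.Dict.mk (pvGroupItems xs)).getD (pvKeyB x) [] = [] := by
        simp only [PySem.Dict.getD, PySem.Dict.get?]
        rw [List.find?_eq_none.mpr]
        · rfl
        · intro p hp
          rcases List.mem_map.mp hp with ⟨d, hd, rfl⟩
          intro hbeq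
          exact hmem ((by simpa using hbeq : d = pvKeyB x) ▸ hd)
      have hcon' : ¬ (PySem.Set.ofList (xs.map pvKeyB)).contains (pvKeyB x) = true :=
        fun h => hmem ((PySem.Set.contains_iff _ _).mp h)
      have hadd : (PySem.Set.ofList (xs.map pvKeyB)).add (pvKeyB x)
          = PySem.Set.ofList (xs.map pvKeyB) ++ [pvKeyB x] := by
        unfold PySem.Set.add
        rw [if_neg hcon']
      rw [hadd]
      simp only [PySem.Dict.modify, PySem.Dict.insert, hcon, Bool.false_eq_true, if_neg,
        not_false_iff, hget, List.nil_append]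
      rw [List.map_append]
      simp only [pvGroupItems]
      congr 1
      · apply List.map_congr_left
        intro d hd
        have hxd : (pvKeyB x == d) = false := by
          simp; exact fun h => hmem (h ▸ hd)
        simp [List.filter_append, hxd]
      · have hfil : xs.filter (fun s => pvKeyB s == pvKeyB x) = [] := by
          rw [List.filter_eq_nil_iff]
          intro s hs h
          exact hknotin (List.mem_map.mpr ⟨s, hs, by simpa using h⟩)
        simp [List.filter_append, hfil]

-- A's inner per-submission step appends exactly pvSubLinesB sub
lemma pvInnerStep (lines : List String) (sub : List (String × String)) :
    (let l1 := lines ++ ["  REF: " ++ pvGetDA sub "ref_code" "—"]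
     let l2 := l1 ++ ["  Type: " ++ pvGetDA sub "incident_type" "—"]
     let l3 := l2 ++ ["  Severity: " ++ pvGetDA sub "severity" "—"]
     let loc := match pvGet?A sub "location" with
       | some l => if l = "" then "Not specified" else l
       | none   => "Not specified"
     let l4 := l3 ++ ["  Location: " ++ loc]
     let l5 := l4 ++ ["  Description: " ++ pvGetDA sub "description" "—"]
     let l6 := match pvGet?A sub "evacuation" with
       | some e => if e = "" then l5 else l5 ++ ["  Evacuation: " ++ e]
       | none   => l5
     let l7 := l6 ++ ["  Submitted: " ++ pvGetDA sub "timestamp" "—"]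
     l7 ++ [""])
    = lines ++ pvSubLinesB sub := by
  simp only [pvSubLinesB, pvGetDA, pvGet?A]
  cases hev : (PySem.Dict.ofList sub).get? "evacuation" with
  | none => simp
  | some e =>
    by_cases he : e = "" <;> simp [he]

lemma pvFoldInner (subs : List (List (String × String))) (init : List String) :
    subs.foldl
      (fun lines sub =>
        let lines := lines ++ ["  REF: " ++ pvGetDA sub "ref_code" "—"]
        let lines := lines ++ ["  Type: " ++ pvGetDA sub "incident_type" "—"]
        let lines := lines ++ ["  Severity: " ++ pvGetDA sub "severity" "—"]
        let loc := match pvGet?A sub "location" with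
          | some l => if l = "" then "Not specified" else l
          | none   => "Not specified"
        let lines := lines ++ ["  Location: " ++ loc]
        let lines := lines ++ ["  Description: " ++ pvGetDA sub "description" "—"]
        let lines := match pvGet?A sub "evacuation" with
          | some e => if e = "" then lines else lines ++ ["  Evacuation: " ++ e]
          | none   => lines
        let lines := lines ++ ["  Submitted: " ++ pvGetDA sub "timestamp" "—"]
        lines ++ [""]) init
    = init ++ subs.flatMap pvSubLinesB := by
  have h : (fun (lines : List String) sub =>
        let lines := lines ++ ["  REF: " ++ pvGetDA sub "ref_code" "—"]
        let lines := lines ++ ["  Type: " ++ pvGetDA sub "incident_type" "—"]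
        let lines := lines ++ ["  Severity: " ++ pvGetDA sub "severity" "—"]
        let loc := match pvGet?A sub "location" with
          | some l => if l = "" then "Not specified" else l
          | none   => "Not specified"
        let lines := lines ++ ["  Location: " ++ loc]
        let lines := lines ++ ["  Description: " ++ pvGetDA sub "description" "—"]
        let lines := match pvGet?A sub "evacuation" with
          | some e => if e = "" then lines else lines ++ ["  Evacuation: " ++ e]
          | none   => lines
        let lines := lines ++ ["  Submitted: " ++ pvGetDA sub "timestamp" "—"]
        lines ++ [""])
      = fun lines sub => lines ++ pvSubLinesB sub := by
    funext lines sub; exact pvInnerStep lines sub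
  rw [h, PySem.List.foldl_append_eq_flatMap]

-- B's inner scan over all submissions with the district test = filter then flatMap
lemma pvFoldFilter (subs : List (List (String × String))) (d : String) (init : List String) :
    subs.foldl (fun lines sub => if pvKeyB sub == d then lines ++ pvSubLinesB sub else lines) init
      = init ++ (subs.filter (fun s => pvKeyB s == d)).flatMap pvSubLinesB := by
  induction subs generalizing init with
  | nil => simp
  | cons s subs ih =>
    rw [List.foldl_cons, List.filter_cons]
    by_cases h : (pvKeyB s == d) = true
    · rw [if_pos h, if_pos h, ih, List.flatMap_cons, List.append_assoc]
    · rw [if_neg h, if_neg h, ih]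

theorem format_submissions_spec : Claim_equal_format_submissions := by
  intro submissions _
  unfold Spec_format_submissions format_submissions format_submissions_alt
  simp only []
  rw [pvGroup_eq]
  -- name the sorted item list: map over the sorted distinct districts
  have hkeyA : ∀ sub, pvGetDA sub "district" "Unknown" = pvKeyB sub := fun _ => rfl
  set ds := PySem.List.sorted (PySem.Set.ofList (submissions.map pvKeyB)) (fun x => x) with hds
  have hsorted : PySem.List.sorted (pvGroupItems submissions) (fun p => p.1)
      = ds.map (fun d => (d, submissions.filter (fun s => pvKeyB s == d))) := by
    apply PySem.List.sorted_eq_of_perm_of_pairwise_lt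
    · exact (PySem.List.sorted_perm _ _ _).map _
    · have hp := PySem.List.sorted_ofList_pairwise_lt (submissions.map pvKeyB)
      rw [← hds] at hp
      exact (List.pairwise_map.mpr (by simpa using hp))
  rw [hsorted]
  congr 1
  -- outer loops: both sides are init-appending folds over the same district list
  rw [show (fun (lines : List String)
        (dsubs : String × List (List (String × String))) =>
          dsubs.2.foldl _ (lines ++ ["\n=== " ++ dsubs.1 ++ " ==="]))
      = (fun lines dsubs => lines ++
          (("\n=== " ++ dsubs.1 ++ " ===") :: dsubs.2.flatMap pvSubLinesB)) from
    funext fun lines => funext fun dsubs => by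
      rw [pvFoldInner]; simp]
  rw [show (fun (lines : List String) (district : String) =>
        submissions.foldl
          (fun lines sub => if pvKeyB sub == district then lines ++ pvSubLinesB sub else lines)
          (lines ++ ["\n=== " ++ district ++ " ==="]))
      = (fun lines district => lines ++
          (("\n=== " ++ district ++ " ===") ::
            (submissions.filter (fun s => pvKeyB s == district)).flatMap pvSubLinesB)) from
    funext fun lines => funext fun district => by
      rw [pvFoldFilter]; simp]
  rw [PySem.List.foldl_append_eq_flatMap, PySem.List.foldl_append_eq_flatMap]
  rw [List.flatMap_map]
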